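-- pv_equiv track=rewrite | github.com/akbiggs/challonge-tools | garpr_seeds.py | ranks_to_seeds
-- ===== SOURCE A (Python) =====
-- UNKNOWN_RANK = -1
--
-- def ranks_to_seeds(ranks):
--     """Squashes ranks so they're ordered from 1 to N and can be used as seeds.
--
--     e.g. [4, 6, UNKNOWN_RANK, 2, UNKNOWN_RANK] => [2, 3, 4, 1, 5]
--
--     Args:
--       ranks: The numerical ranks of the players from gaR PR. UNKNOWN_RANK should
--              be used if the player has no ranks. All ranks are expected to be
--              unique.
--
--     Returns:
--       The seeds, in the same order as the original ranks. The order of values is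
--       sequential, such that the largest difference between any two ranks in a
--       sorted list of ranks is 1, and all unknown ranks are converted to
--       last-place seeds in order of appearance.
--     """
--     # Our approach is to sort the ranks since seeds should just be the
--     # sorted order of the known ranks. We filter out unknown ranks since they'd
--     # disrupt the order.
--     sorted_known_ranks = [x for x in sorted(ranks) if x != UNKNOWN_RANK]
--
--     next_last_place_seed = len(sorted_known_ranks) + 1
--     seeds = []
--     for i, rank in enumerate(ranks):
--         if rank == UNKNOWN_RANK:
--             seeds.append(next_last_place_seed)
--             next_last_place_seed = next_last_place_seed + 1
--         else:
--             seeds.append(sorted_known_ranks.index(rank) + 1)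
--
--     return seeds
-- ===== SOURCE B (Python) =====
-- UNKNOWN_RANK = -1
--
-- def ranks_to_seeds(ranks):
--     """Scatter approach: sort (rank, index) pairs once, then write each seed
--     directly into its player's slot; ties (duplicate ranks) share the seed of
--     the run's first sorted position, and no per-player search is needed."""
--     seeds = [0] * len(ranks)
--     known_pairs = sorted([(r, i) for i, r in enumerate(ranks) if r != UNKNOWN_RANK],
--                          key=lambda p: p[0])
--     last_rank = None
--     seed = 0
--     for j, pair in enumerate(known_pairs):
--         if last_rank != pair[0]:
--             seed = j + 1
--             last_rank = pair[0]
--         seeds[pair[1]] = seed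
--     next_seed = len(known_pairs) + 1
--     for i, r in enumerate(ranks):
--         if r == UNKNOWN_RANK:
--             seeds[i] = next_seed
--             next_seed += 1
--     return seeds
-- ===== Notes on version B (the rewrite author's own statement) =====
-- stated objective: faster
-- what changed: Inverts the traversal: instead of scanning the sorted known-rank list with list.index for every player (a linear search per element), B sorts (rank, index) pairs once and scatters seed j+1 (shared across a run of equal ranks) directly into slot index while walking the sorted pairs, so no per-player search remains.
import Mathlib
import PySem

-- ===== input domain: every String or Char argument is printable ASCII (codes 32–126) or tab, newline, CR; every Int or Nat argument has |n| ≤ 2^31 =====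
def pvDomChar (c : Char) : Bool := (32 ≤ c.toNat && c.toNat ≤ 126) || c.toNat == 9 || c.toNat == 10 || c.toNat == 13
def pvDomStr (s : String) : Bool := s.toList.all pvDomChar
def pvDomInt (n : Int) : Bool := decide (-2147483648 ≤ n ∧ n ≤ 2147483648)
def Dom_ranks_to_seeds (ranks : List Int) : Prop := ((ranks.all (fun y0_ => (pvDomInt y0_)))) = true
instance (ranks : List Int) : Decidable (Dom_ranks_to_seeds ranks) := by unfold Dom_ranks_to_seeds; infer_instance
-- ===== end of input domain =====

-- B sorts (rank, index) pairs once and scatters each seed into its slot, instead of A's per-player search of the sorted rank list (faster, asymptotic).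

-- ===== PORT A =====
def ranks_to_seeds (ranks : List Int) : List Int :=
  let sorted_known := (PySem.List.sorted ranks (fun x => x) false).filter (fun x => decide (x ≠ -1))
  -- .index never raises here (rank ≠ -1 is always in sorted_known), so getD 0 is exact
  (ranks.foldl (fun (st : Int × List Int) rank =>
      if rank = -1 then (st.1 + 1, st.2 ++ [st.1])
      else (st.1, st.2 ++ [((PySem.List.index? sorted_known rank).getD 0 : Int) + 1]))
    ((sorted_known.length : Int) + 1, [])).2

-- ===== PORT B =====
def ranks_to_seeds_alt (ranks : List Int) : List Int :=
  let seeds0 := List.replicate ranks.length (0 : Int)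
  let known_pairs := PySem.List.sorted
      ((PySem.List.enumerate ranks 0).filterMap (fun p => if p.2 ≠ -1 then some (p.2, p.1) else none))
      (fun q => q.1) false
  -- list positions written to are enumerate indices, hence ≥ 0: .toNat is exact
  let seeds1 := ((PySem.List.enumerate known_pairs 0).foldl
      (fun (st : Option Int × Int × List Int) q =>
        let ls := if st.1 ≠ some q.2.1 then (some q.2.1, q.1 + 1) else (st.1, st.2.1)
        (ls.1, ls.2, st.2.2.set q.2.2.toNat ls.2))
      (none, 0, seeds0)).2.2
  ((PySem.List.enumerate ranks 0).foldl
      (fun (st : Int × List Int) p =>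
        if p.2 = -1 then (st.1 + 1, st.2.set p.1.toNat st.1) else st)
      ((known_pairs.length : Int) + 1, seeds1)).2

-- ===== PRECONDITION & SPEC =====
def Spec_ranks_to_seeds (ranks : List Int) (out : List Int) : Prop := out = ranks_to_seeds_alt ranks
instance (ranks : List Int) (out : List Int) : Decidable (Spec_ranks_to_seeds ranks out) := by unfold Spec_ranks_to_seeds; infer_instance

-- ===== CLAIM (what is proved, stated in full; the proofs are below) =====
def Claim_equal_ranks_to_seeds : Prop := ∀ (ranks : List Int), Dom_ranks_to_seeds ranks → Spec_ranks_to_seeds ranks (ranks_to_seeds ranks)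

-- ===== LEMMAS AND PROOFS =====

-- proof-only helper: the list A's append loop builds, with the running last-place counter
def buildA (g : Int → Int) (c : Int) : List Int → List Int
  | [] => []
  | r :: t => if r = -1 then c :: buildA g (c + 1) t else g r :: buildA g c t

theorem foldA (g : Int → Int) (l : List Int) (c : Int) (acc : List Int) :
    (l.foldl (fun (st : Int × List Int) rank =>
        if rank = -1 then (st.1 + 1, st.2 ++ [st.1]) else (st.1, st.2 ++ [g rank])) (c, acc)).2
      = acc ++ buildA g c l := by
  induction l generalizing c acc with
  | nil => simp [buildA]
  | cons r t ih =>
    by_cases hr : r = -1 <;> simp [buildA, hr, ih]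

theorem buildA_getElem? (g : Int → Int) (l : List Int) (c : Int) (i : Nat) :
    (buildA g c l)[i]? = l[i]?.map (fun r =>
      if r = -1 then c + (((l.take i).countP (fun x => decide (x = -1))) : Int) else g r) := by
  induction l generalizing c i with
  | nil => simp [buildA]
  | cons r t ih =>
    cases i with
    | zero => by_cases hr : r = -1 <;> simp [buildA, hr]
    | succ i =>
      by_cases hr : r = -1
      · simp only [buildA, hr, if_true, List.getElem?_cons_succ, ih, List.take_succ_cons,
          List.countP_cons]
        cases h : t[i]? with
        | none => simp
        | some v =>
          by_cases hv : v = -1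
          · simp [hv]
            ring
          · simp [hv]
      · simp only [buildA, hr, if_false, List.getElem?_cons_succ, ih, List.take_succ_cons,
          List.countP_cons]
        cases h : t[i]? with
        | none => simp
        | some v =>
          by_cases hv : v = -1 <;> simp [hv]

theorem scatter2_length (L : List (Int × (Int × Int))) (st : Option Int × Int × List Int) :
    ((L.foldl (fun (st : Option Int × Int × List Int) q =>
        ((if st.1 ≠ some q.2.1 then (some q.2.1, q.1 + 1) else (st.1, st.2.1)).1,
         (if st.1 ≠ some q.2.1 then (some q.2.1, q.1 + 1) else (st.1, st.2.1)).2,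
         st.2.2.set q.2.2.toNat
           ((if st.1 ≠ some q.2.1 then (some q.2.1, q.1 + 1) else (st.1, st.2.1)).2))) st).2.2).length
      = st.2.2.length := by
  induction L generalizing st with
  | nil => rfl
  | cons q T ih =>
    rw [List.foldl_cons, ih]
    simp

theorem scatter2 (kp : List (Int × Int)) (hsort : kp.Pairwise (fun a b => a.1 ≤ b.1)) :
    ∀ (L P : List (Int × Int)), kp = P ++ L →
    ∀ (s : List Int) (last : Option Int) (seed : Int) (i : Nat), i < s.length →
    (∀ q ∈ L, 0 ≤ q.2) → L.Pairwise (fun a b => a.2 ≠ b.2) →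
    last = (P.map Prod.fst).getLast? →
    (∀ v, last = some v → seed = 1 + ((PySem.List.index? (kp.map Prod.fst) v).getD 0 : Int)) →
    (((PySem.List.enumerate L (P.length : Int)).foldl
        (fun (st : Option Int × Int × List Int) q =>
          ((if st.1 ≠ some q.2.1 then (some q.2.1, q.1 + 1) else (st.1, st.2.1)).1,
           (if st.1 ≠ some q.2.1 then (some q.2.1, q.1 + 1) else (st.1, st.2.1)).2,
           st.2.2.set q.2.2.toNat
             ((if st.1 ≠ some q.2.1 then (some q.2.1, q.1 + 1) else (st.1, st.2.1)).2)))
        (last, seed, s)).2.2)[i]? =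
      match L.findIdx? (fun q => q.2 = (i : Int)) with
      | some j => (L[j]?).map (fun p => 1 + (((PySem.List.index? (kp.map Prod.fst) p.1).getD 0) : Int))
      | none => s[i]? := by
  intro L
  induction L with
  | nil =>
    intro P _ s last seed i hi _ _ _ _
    simp [PySem.List.enumerate_nil]
  | cons q T ih =>
    intro P hdecomp s last seed i hi hpos hnd hlast hseed
    have hdecomp' : kp = (P ++ [q]) ++ T := by rw [hdecomp, List.append_assoc]; rfl
    rcases List.pairwise_cons.mp hnd with ⟨hq2, hT⟩
    -- key fact: the value assigned at q is 1 + firstIdx of q.1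
    have hkey : (if ¬ last = some q.1 then (P.length : Int) + 1 else seed)
        = 1 + ((PySem.List.index? (kp.map Prod.fst) q.1).getD 0 : Int) := by
      by_cases hb : last = some q.1
      · rw [if_neg (not_not_intro hb)]
        exact hseed q.1 hb
      · rw [if_pos hb]
        have hnotmem : q.1 ∉ P.map Prod.fst := by
          intro hmem
          obtain ⟨p, hpP, hpq⟩ := List.mem_map.mp hmem
          have hPne : P ≠ [] := by rintro rfl; simp at hpP
          have hs' : (P ++ q :: T).Pairwise (fun a b => a.1 ≤ b.1) := hdecomp ▸ hsort
          rcases List.pairwise_append.mp hs' with ⟨hP, _, hcross⟩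
          have h1 : (P.getLast hPne).1 ≤ q.1 :=
            hcross _ (List.getLast_mem hPne) q List.mem_cons_self
          obtain ⟨m, hm, rfl⟩ := List.mem_iff_getElem.mp hpP
          have hPlast : P.getLast hPne = P[P.length - 1]'(by omega) :=
            List.getLast_eq_getElem hPne
          have h2 : P[m].1 ≤ (P.getLast hPne).1 := by
            rcases Nat.lt_or_ge m (P.length - 1) with hl | hge
            · rw [hPlast]
              exact List.pairwise_iff_getElem.mp hP m (P.length - 1) hm (by omega) hl
            · have hme : m = P.length - 1 := by omega
              subst hme
              exact le_of_eq (congrArg Prod.fst hPlast.symm)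
          have h3 : (P.getLast hPne).1 = q.1 := le_antisymm h1 (hpq ▸ h2)
          apply hb
          rw [hlast, List.getLast?_map, List.getLast?_eq_some_getLast hPne]
          simp [h3]
        have hidx : PySem.List.index? (kp.map Prod.fst) q.1 = some P.length := by
          rw [PySem.List.index?_eq_some_iff]
          exact ⟨P.map Prod.fst, T.map Prod.fst,
            by rw [hdecomp]; simp, by simp, hnotmem⟩
        rw [hidx]
        simp
        ring
    rw [PySem.List.enumerate_cons]
    simp only [List.foldl_cons, List.findIdx?_cons]
    have hlen' : ((P.length : Int)) + 1 = (((P ++ [q]).length : Nat) : Int) := by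
      simp
    have hfst : (if ¬ last = some q.1 then (some q.1, (P.length : Int) + 1) else (last, seed)).1
        = some q.1 := by
      by_cases h : last = some q.1
      · rw [if_neg (not_not_intro h), h]
      · rw [if_pos h]
    have hsnd : (if ¬ last = some q.1 then (some q.1, (P.length : Int) + 1) else (last, seed)).2
        = (if ¬ last = some q.1 then (P.length : Int) + 1 else seed) := by
      by_cases h : last = some q.1
      · rw [if_neg (not_not_intro h), if_neg (not_not_intro h)]
      · rw [if_pos h, if_pos h]
    rw [hfst, hsnd, hlen']
    rw [hlen'] at hkey
    have hlast' : (some q.1 : Option Int) = ((P ++ [q]).map Prod.fst).getLast? := by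
      rw [List.map_append]
      simp
    have hseed' : ∀ v, (some q.1 : Option Int) = some v →
        (if ¬ last = some q.1 then (((P ++ [q]).length : Nat) : Int) else seed)
          = 1 + ((PySem.List.index? (kp.map Prod.fst) v).getD 0 : Int) := by
      intro v hv
      cases hv
      exact hkey
    rw [ih (P ++ [q]) hdecomp'
      (s.set q.2.toNat (if ¬ last = some q.1 then (((P ++ [q]).length : Nat) : Int) else seed))
      (some q.1) (if ¬ last = some q.1 then (((P ++ [q]).length : Nat) : Int) else seed) i
      (by simpa using hi) (fun a ha => hpos a (List.mem_cons_of_mem _ ha)) hT hlast' hseed']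
    by_cases hqi : q.2 = (i : Int)
    · simp only [hqi, decide_true, if_true]
      have hnone : T.findIdx? (fun p => p.2 = (i : Int)) = none := by
        simp only [List.findIdx?_eq_none_iff]
        intro x hx
        exact decide_eq_false (fun (hc : x.2 = (i : Int)) => hq2 x hx (hqi.trans hc.symm))
      rw [hnone]
      have htn : q.2.toNat = i := by omega
      simp only [List.getElem?_set, Int.toNat_natCast, hi, if_true,
        List.getElem?_cons_zero, Option.map_some]
      rw [hkey]
    · simp only [hqi, decide_false]
      have hne : ¬ (q.2.toNat = i) := by
        have := hpos q List.mem_cons_self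
        omega
      cases h : T.findIdx? (fun p => p.2 = (i : Int)) with
      | none =>
        simp [hne]
      | some j =>
        simp

theorem fin_getElem? (l : List Int) (k : Nat) (c : Int) (s : List Int)
    (hs : s.length = k + l.length) (i : Nat) :
    (((PySem.List.enumerate l (k : Int)).foldl
        (fun (st : Int × List Int) p =>
          if p.2 = -1 then (st.1 + 1, st.2.set p.1.toNat st.1) else st) (c, s)).2)[i]? =
      if k ≤ i ∧ l[i - k]? = some (-1) then
        some (c + (((l.take (i - k)).countP (fun x => decide (x = -1))) : Int))
      else s[i]? := by
  induction l generalizing k c s with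
  | nil => simp [PySem.List.enumerate_nil]
  | cons r t ih =>
    rw [PySem.List.enumerate_cons]
    simp only [List.foldl_cons]
    have hcast : (k : Int) + 1 = ((k + 1 : Nat) : Int) := by push_cast; ring
    have hks : k < s.length := by simp at hs; omega
    by_cases hr : r = -1
    · simp only [hr, if_true]
      rw [hcast, ih (k + 1) (c + 1) (s.set ((k : Int)).toNat (c))
        (by simp at hs ⊢; omega)]
      simp only [List.getElem?_set, Int.toNat_natCast]
      rcases Nat.lt_trichotomy i k with h | h | h
      · have h1 : ¬ (k ≤ i) := by omega
        have h2 : ¬ (k + 1 ≤ i) := by omega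
        simp [h1, h2]
        exact fun h' => absurd h' (by omega)
      · subst h
        have h2 : ¬ (i + 1 ≤ i) := by omega
        simp [h2, hks]
      · have h1 : k ≤ i := by omega
        have h2 : k + 1 ≤ i := by omega
        have hsub : i - k = (i - (k + 1)) + 1 := by omega
        rw [hsub]
        simp only [List.getElem?_cons_succ, List.take_succ_cons, List.countP_cons]
        by_cases h3 : t[i - (k + 1)]? = some (-1)
        · simp only [h1, h2, h3, and_true, if_pos]
          simp
          ring
        · simp [h1, h2, h3]
          exact fun h' => absurd h' (by omega)
    · simp only [hr, if_false]
      rw [hcast, ih (k + 1) c s (by simp at hs ⊢; omega)]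
      rcases Nat.lt_trichotomy i k with h | h | h
      · have h1 : ¬ (k ≤ i) := by omega
        have h2 : ¬ (k + 1 ≤ i) := by omega
        simp [h1, h2]
      · subst h
        have h2 : ¬ (i + 1 ≤ i) := by omega
        simp [h2, hr]
      · have h1 : k ≤ i := by omega
        have h2 : k + 1 ≤ i := by omega
        have hsub : i - k = (i - (k + 1)) + 1 := by omega
        rw [hsub]
        simp only [List.getElem?_cons_succ, List.take_succ_cons, List.countP_cons, hr]
        by_cases h3 : t[i - (k + 1)]? = some (-1)
        · simp [h1, h2, h3]
        · simp [h1, h2, h3]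

theorem mapFst_pairs (l : List Int) (s : Int) :
    (((PySem.List.enumerate l s).filterMap
        (fun p => if p.2 ≠ -1 then some (p.2, p.1) else none)).map Prod.fst)
      = l.filter (fun x => decide (x ≠ -1)) := by
  induction l generalizing s with
  | nil => simp [PySem.List.enumerate_nil]
  | cons r t ih =>
    rw [PySem.List.enumerate_cons]
    by_cases hr : r = -1 <;> simpa [List.filterMap_cons, hr] using ih (s + 1)

theorem pairs_pos_nonneg (l : List Int) (q : Int × Int)
    (hq : q ∈ (PySem.List.enumerate l 0).filterMap
        (fun p => if p.2 ≠ -1 then some (p.2, p.1) else none)) : 0 ≤ q.2 := by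
  rcases List.mem_filterMap.mp hq with ⟨p, hp, hpq⟩
  rcases (PySem.List.mem_enumerate_iff l 0 p).mp hp with ⟨k, hk, rfl⟩
  by_cases h : ¬ ((0 + (k : Int), l[k]).2 = -1)
  · rw [if_pos h] at hpq
    cases hpq
    simp
  · rw [if_neg h] at hpq
    cases hpq

theorem pairs_pos_pairwise (l : List Int) :
    ((PySem.List.enumerate l 0).filterMap
        (fun p => if p.2 ≠ -1 then some (p.2, p.1) else none)).Pairwise
      (fun a b => a.2 ≠ b.2) := by
  refine List.Pairwise.filterMap _ ?_ (PySem.List.pairwise_lt_enumerate l 0)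
  intro a a' hlt b hb b' hb'
  by_cases h1 : ¬ (a.2 = -1)
  · rw [if_pos h1] at hb
    by_cases h2 : ¬ (a'.2 = -1)
    · rw [if_pos h2] at hb'
      cases hb
      cases hb'
      simp only [ne_eq]
      intro hc
      omega
    · rw [if_neg h2] at hb'
      cases hb'
  · rw [if_neg h1] at hb
    cases hb

-- ===== VERDICT (by name: the statement is the Claim_ definition above) =====
theorem ranks_to_seeds_spec : Claim_equal_ranks_to_seeds := by
  intro ranks _
  unfold Spec_ranks_to_seeds
  simp only [ranks_to_seeds, ranks_to_seeds_alt]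
  set K := (PySem.List.sorted ranks (fun x => x) false).filter (fun x => decide (x ≠ -1)) with hK
  set pairs := (PySem.List.enumerate ranks 0).filterMap
      (fun p => if p.2 ≠ -1 then some (p.2, p.1) else none) with hpairs
  set kp := PySem.List.sorted pairs (fun q => q.1) false with hkp
  set seeds0 := List.replicate ranks.length (0 : Int) with hseeds0
  set seeds1 := ((PySem.List.enumerate kp 0).foldl
      (fun (st : Option Int × Int × List Int) q =>
        ((if st.1 ≠ some q.2.1 then (some q.2.1, q.1 + 1) else (st.1, st.2.1)).1,
         (if st.1 ≠ some q.2.1 then (some q.2.1, q.1 + 1) else (st.1, st.2.1)).2,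
         st.2.2.set q.2.2.toNat
           ((if st.1 ≠ some q.2.1 then (some q.2.1, q.1 + 1) else (st.1, st.2.1)).2)))
      (none, 0, seeds0)).2.2 with hseeds1
  -- shared facts
  have hmapK : kp.map Prod.fst = K := by
    apply PySem.List.eq_of_perm_of_pairwise_le
    · have h1 : (kp.map Prod.fst).Perm (pairs.map Prod.fst) :=
        (PySem.List.sorted_perm pairs (fun q => q.1) false).map _
      have h2 : pairs.map Prod.fst = ranks.filter (fun x => decide (x ≠ -1)) :=
        mapFst_pairs ranks 0
      have h3 : K.Perm (ranks.filter (fun x => decide (x ≠ -1))) :=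
        (PySem.List.sorted_perm ranks (fun x => x) false).filter _
      rw [h2] at h1
      exact h1.trans h3.symm
    · exact PySem.List.sorted_map_key_pairwise pairs (fun q => q.1)
    · exact (PySem.List.sorted_pairwise ranks (fun x => x)).filter _
  have hlenK : kp.length = K.length := by
    rw [← hmapK, List.length_map]
  have hkpperm : kp.Perm pairs := PySem.List.sorted_perm pairs (fun q => q.1) false
  have hkpsort : kp.Pairwise (fun a b => a.1 ≤ b.1) :=
    PySem.List.sorted_pairwise pairs (fun q => q.1)
  have hkpnd : kp.Pairwise (fun a b => a.2 ≠ b.2) :=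
    (List.Perm.pairwise_iff (fun {x y} a => (Ne.symm a)) hkpperm).mpr (pairs_pos_pairwise ranks)
  have hkppos : ∀ q ∈ kp, 0 ≤ q.2 := fun q hq => pairs_pos_nonneg ranks q (hkpperm.mem_iff.mp hq)
  have hlen1 : seeds1.length = ranks.length := by
    rw [hseeds1, scatter2_length, hseeds0, List.length_replicate]
  -- A side becomes buildA
  rw [foldA (fun r => ((PySem.List.index? K r).getD 0 : Int) + 1), List.nil_append]
  refine List.ext_getElem? fun i => ?_
  rw [buildA_getElem?]
  have hfin := fin_getElem? ranks 0 ((kp.length : Int) + 1) seeds1 (by simpa using hlen1) i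
  simp only [Nat.cast_zero, Nat.sub_zero, Nat.zero_le, true_and] at hfin
  rw [hfin]
  by_cases hin : i < ranks.length
  · have hgi : ranks[i]? = some (ranks[i]) := List.getElem?_eq_getElem hin
    rw [hgi]
    by_cases hr : ranks[i] = -1
    · simp [hr, hlenK]
    · -- known rank: scatter result
      have hmem_pairs : ((ranks[i], (i : Int)) : Int × Int) ∈ pairs := by
        rw [hpairs]
        refine List.mem_filterMap.mpr ⟨((i : Int), ranks[i]), ?_, ?_⟩
        · exact (PySem.List.mem_enumerate_iff ranks 0 _).mpr ⟨i, hin, by simp⟩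
        · simp [hr]
      have hmem_kp : ((ranks[i], (i : Int)) : Int × Int) ∈ kp := hkpperm.mem_iff.mpr hmem_pairs
      obtain ⟨j, hj, hkpj⟩ := List.mem_iff_getElem.mp hmem_kp
      have hfind : kp.findIdx? (fun q => q.2 = (i : Int)) = some j := by
        rw [List.findIdx?_eq_some_iff_getElem]
        refine ⟨hj, by simp [hkpj], ?_⟩
        intro m hm
        have hne : (kp[m]'(by omega)).2 ≠ (kp[j]'hj).2 :=
          List.pairwise_iff_getElem.mp hkpnd m j (by omega) hj hm
        simp only [decide_eq_true_eq]
        intro hc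
        exact hne (by rw [hc, hkpj])
      have hscat := scatter2 kp hkpsort kp [] rfl seeds0 none 0 i
        (by rw [hseeds0]; simpa [List.length_replicate] using hin)
        hkppos hkpnd (by simp) (fun v hv => by cases hv)
      simp only [List.length_nil, Nat.cast_zero] at hscat
      rw [← hseeds1] at hscat
      rw [hfind] at hscat
      have hjq : kp[j]? = some ((ranks[i], (i : Int))) := by
        rw [List.getElem?_eq_getElem hj, hkpj]
      simp only [hjq, hmapK, Option.map_some] at hscat
      have harith : (1 : Int) + ((PySem.List.index? K (ranks[i])).getD 0 : Int)
          = ((PySem.List.index? K (ranks[i])).getD 0 : Int) + 1 := by ring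
      simp [hr, hscat]
      ring
  · have hnone1 : ranks[i]? = none := List.getElem?_eq_none_iff.mpr (by omega)
    rw [hnone1]
    simp only [Option.map_none]
    have hs1 : seeds1[i]? = none := List.getElem?_eq_none_iff.mpr (by omega)
    simp [hs1]
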